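-- pv_equiv track=rewrite | github.com/theoboury/positioningempiricalmaxstacksdesigns | checkSeparability.py | get_assignments
-- ===== SOURCE A (Python) =====
-- def is_leaf(v):
--     """
--     Input:
--        * v, a secondary structure tree
--     Output:
--        * A boolean if the node v[0] is a leaf or not
--     """
--     if v[0] == "root":
--         return False
--     (a, b) = v[0]
--     if a == b:
--         return True
--     return False
--
-- children_colors_from_parent = {
--     'AU' : ['AU','GC','CG'],
--     'UA' : ['UA','GC','CG'],
--     'GC' : ['UA','GC','AU'],
--     'CG' : ['UA','CG','AU'],
--     'R' : ['GC', 'UA','CG','AU']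
-- }
--
-- def get_assignments(l,c,i=0):
--     """
--     Input:
--         * l, a (partial) list of an ordered list of assignments for the leaves and BP children
--         * c, assignment of the parent base pairs (or information that the parent is the root)
--         * i, the index of the node considered to assign
--     Output:
--         * The complete list of an ordered list of assignments for the leaves and BP children
--     """
--     if i >= len(l):
--         return [[]]
--     else:
--         v = l[i]
--         if is_leaf(v):
--             if c not in ["AU","UA"]:
--                 return [['A'] + lp for lp in get_assignments(l,c,i+1) if ('AU' not in lp) and ('UA' not in lp)]
--             else:
--                 return []
--
--         else:
--             res = []
--             for cv in children_colors_from_parent[c]: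
--                 for a in get_assignments(l,c,i+1):
--                     if cv not in a:
--                         if (cv not in ["AU","UA"]) or ('A' not in a):
--                             res.append([cv] + a)
--             return res
-- ===== SOURCE B (Python) =====
-- children_colors_from_parent = {
--     'AU' : ['AU','GC','CG'],
--     'UA' : ['UA','GC','CG'],
--     'GC' : ['UA','GC','AU'],
--     'CG' : ['UA','CG','AU'],
--     'R' : ['GC', 'UA','CG','AU']
-- }
--
-- def is_leaf(v):
--     if v[0] == "root":
--         return False
--     (a, b) = v[0]
--     return a == b
--
-- def _ok(t):
--     """Global validity of one complete assignment tuple."""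
--     for j in range(len(t)):
--         if t[j] != 'A' and t[j] in t[j + 1:]:
--             return False
--     return not ('A' in t and ('AU' in t or 'UA' in t))
--
-- def get_assignments(l, c, i=0):
--     # stage 1: per-node candidate colour lists
--     cands = []
--     for idx in range(i, len(l)):
--         v = l[idx]
--         if is_leaf(v):
--             cands.append(['A'] if c not in ('AU', 'UA') else [])
--         else:
--             cands.append(children_colors_from_parent[c])
--     # stage 2: full Cartesian product, built left to right (lexicographic order)
--     tuples = [[]]
--     for choices in cands:
--         tuples = [p + [x] for p in tuples for x in choices]
--     # stage 3: keep the globally valid assignments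
--     return [t for t in tuples if _ok(t)]
-- ===== Notes on version B (the rewrite author's own statement) =====
-- stated objective: alternative
-- what changed: A interleaves generation and pruning in a recursion that re-evaluates the whole suffix call for every candidate colour; B is a three-stage pipeline: first compute each node's candidate colour list, then build the full Cartesian product with a forward fold, then filter once with a single global validity predicate (pairwise-distinct non-leaf colours, no 'A' together with 'AU'/'UA').
-- outside the precondition, e.g. on get_assignments([['aa'], ['x']], 'AU', 0): A returns [], B raises ValueError
import Mathlib
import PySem

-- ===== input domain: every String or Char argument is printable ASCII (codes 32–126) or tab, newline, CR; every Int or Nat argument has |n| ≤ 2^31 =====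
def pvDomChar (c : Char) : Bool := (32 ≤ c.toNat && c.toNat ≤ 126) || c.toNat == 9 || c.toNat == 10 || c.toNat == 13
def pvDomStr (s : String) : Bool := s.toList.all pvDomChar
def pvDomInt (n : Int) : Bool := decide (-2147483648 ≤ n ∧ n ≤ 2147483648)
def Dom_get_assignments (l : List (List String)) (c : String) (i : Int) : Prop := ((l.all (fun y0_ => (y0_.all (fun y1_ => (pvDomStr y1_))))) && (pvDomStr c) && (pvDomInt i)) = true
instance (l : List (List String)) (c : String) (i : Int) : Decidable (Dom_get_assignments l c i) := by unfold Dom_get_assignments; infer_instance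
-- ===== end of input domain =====

-- B replaces A's generate-and-prune recursion by a three-stage pipeline (per-node candidate
-- lists, forward Cartesian product, one global validity filter); objective: alternative.

-- ===== PORT A =====
def is_leaf (v : List String) : Bool :=
  match v with
  | [] => false          -- Python raises IndexError here (excluded by Pre_)
  | s :: _ =>
    if s = "root" then false
    else
      match s.toList with
      | [a, b] => a == b
      | _ => false       -- Python raises ValueError here (excluded by Pre_)

def children_colors_from_parent (c : String) : List String :=
  if c = "AU" then ["AU", "GC", "CG"]
  else if c = "UA" then ["UA", "GC", "CG"]
  else if c = "GC" then ["UA", "GC", "AU"]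
  else if c = "CG" then ["UA", "CG", "AU"]
  else if c = "R" then ["GC", "UA", "CG", "AU"]
  else []                -- Python raises KeyError here (excluded by Pre_)

-- fuel = number of recursion steps = (len(l) - i); fuel 0 ↔ i ≥ len(l)
def get_assignmentsGo (l : List (List String)) (c : String) : Nat → Int → List (List String)
  | 0, _ => [[]]
  | n + 1, i =>
    match PySem.List.pyGet? l i with
    | none => []         -- Python raises IndexError here (excluded by Pre_)
    | some v =>
      if is_leaf v then
        if !(c == "AU") && !(c == "UA") then
          ((get_assignmentsGo l c n (i + 1)).filter
            (fun lp => !(lp.contains "AU") && !(lp.contains "UA"))).map (fun lp => "A" :: lp)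
        else []
      else
        (children_colors_from_parent c).foldl
          (fun res cv =>
            res ++ ((get_assignmentsGo l c n (i + 1)).filter
              (fun a => !(a.contains cv) && ((!(cv == "AU") && !(cv == "UA")) || !(a.contains "A")))).map
              (fun a => cv :: a)) []

def get_assignments (l : List (List String)) (c : String) (i : Int) : List (List String) :=
  get_assignmentsGo l c ((l.length : Int) - i).toNat i

-- ===== PORT B =====
-- Source B's _ok: the for-loop over j scanning t[j+1:] is ported as the structural recursion
-- pvOkLoop; the final boolean, as the conjunction below. Exact on every input.
def pvOkLoop : List String → Bool
  | [] => true
  | x :: rest => (x == "A" || !(rest.contains x)) && pvOkLoop rest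

def pvOk (t : List String) : Bool :=
  pvOkLoop t && !(t.contains "A" && (t.contains "AU" || t.contains "UA"))

-- stage 1 body: one node's candidate colour list
def pvCand (l : List (List String)) (c : String) (idx : Int) : List String :=
  match PySem.List.pyGet? l idx with
  | none => []           -- Python raises IndexError here (excluded by Pre_)
  | some v =>
    if is_leaf v then (if !(c == "AU") && !(c == "UA") then ["A"] else [])
    else children_colors_from_parent c

def get_assignments_alt (l : List (List String)) (c : String) (i : Int) : List (List String) :=
  let cands := (PySem.List.pyRange i (l.length : Int) 1).map (pvCand l c)
  let tuples := cands.foldl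
    (fun ps choices => ps.flatMap (fun p => choices.map (fun x => p ++ [x]))) [[]]
  tuples.filter pvOk

-- ===== PRECONDITION & SPEC =====
-- node from which Python's is_leaf returns without raising
def pvGoodNode (v : List String) : Bool :=
  match v with
  | [] => false
  | s :: _ => s == "root" || s.toList.length == 2

-- node on which Python's is_leaf returns True
def pvLeafNode (v : List String) : Bool :=
  match v with
  | [] => false
  | s :: _ => match s.toList with
    | [a, b] => a == b
    | _ => false

-- Pre_ = the inputs on which Python A returns: either i is past the list, or every node A may
-- visit is well-formed and the dict key c exists whenever a base-pair node could consult it.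
-- It is slightly narrower than A's exact return set: it excludes inputs where a leaf with
-- c ∈ {AU,UA} makes A return [] before ever reading a malformed later node (B's staged pass
-- reads that node and raises there), see the cite in claim.json.
def Pre_get_assignments (l : List (List String)) (c : String) (i : Int) : Prop :=
  (l.length : Int) ≤ i ∨
  (-(l.length : Int) ≤ i ∧
    (∀ v ∈ (if i < 0 then l else l.drop i.toNat), pvGoodNode v = true) ∧
    (c ∈ ["AU", "UA", "GC", "CG", "R"] ∨
      ∀ v ∈ (if i < 0 then l else l.drop i.toNat), pvLeafNode v = true))

instance (l : List (List String)) (c : String) (i : Int) : Decidable (Pre_get_assignments l c i) := by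
  unfold Pre_get_assignments; infer_instance

def pvWitness_get_assignments : List (List String) × String × Int := ([["ab"], ["aa"]], "R", 0)

def Spec_get_assignments (l : List (List String)) (c : String) (i : Int) (out : List (List String)) : Prop := out = get_assignments_alt l c i
instance (l : List (List String)) (c : String) (i : Int) (out : List (List String)) : Decidable (Spec_get_assignments l c i out) := by unfold Spec_get_assignments; infer_instance

-- ===== CLAIM (what is proved, stated in full; the proofs are below) =====
def Claim_equal_get_assignments : Prop := ∀ (l : List (List String)) (c : String) (i : Int), Dom_get_assignments l c i → Pre_get_assignments l c i → Spec_get_assignments l c i (get_assignments l c i)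

-- ===== LEMMAS AND PROOFS =====

-- suffix-style Cartesian product of a list of candidate lists
def pvProd : List (List String) → List (List String)
  | [] => [[]]
  | ch :: cs => ch.flatMap (fun x => (pvProd cs).map (fun r => x :: r))

-- B's forward product fold equals the suffix-style product
theorem pv_fold_prod (cs : List (List String)) (ps : List (List String)) :
    cs.foldl (fun ps choices => ps.flatMap (fun p => choices.map (fun x => p ++ [x]))) ps
      = ps.flatMap (fun p => (pvProd cs).map (fun r => p ++ r)) := by
  induction cs generalizing ps with
  | nil => simp [pvProd]
  | cons ch cs ih =>
    rw [List.foldl_cons, ih, List.flatMap_assoc]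
    apply List.flatMap_congr; intro p _
    simp only [pvProd, List.flatMap_map, List.map_flatMap, List.map_map]
    apply List.flatMap_congr; intro x _
    simp [Function.comp_def, List.append_assoc]

-- pvOk through a leaf's 'A'
theorem pvOk_A_cons (lp : List String) :
    pvOk ("A" :: lp) = (pvOk lp && (!(lp.contains "AU") && !(lp.contains "UA"))) := by
  simp only [pvOk, pvOkLoop, List.contains_cons]
  cases lp.contains "AU" <;> cases lp.contains "UA" <;> cases lp.contains "A" <;>
    cases pvOkLoop lp <;> decide

-- pvOk through a base-pair colour cv (any non-'A' string)
theorem pvOk_color_cons (cv : String) (hcv : (cv == "A") = false) (a : List String) :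
    pvOk (cv :: a)
      = ((!(a.contains cv) && ((!(cv == "AU") && !(cv == "UA")) || !(a.contains "A"))) && pvOk a) := by
  have h1 : (("A" : String) == cv) = false := by
    rw [beq_eq_false_iff_ne] at hcv ⊢
    exact Ne.symm hcv
  have h2 : (("AU" : String) == cv) = (cv == "AU") := by simp [eq_comm]
  have h3 : (("UA" : String) == cv) = (cv == "UA") := by simp [eq_comm]
  simp only [pvOk, pvOkLoop, List.contains_cons, hcv, h1, h2, h3]
  cases a.contains "AU" <;> cases a.contains "UA" <;> cases a.contains "A" <;>
    cases a.contains cv <;> cases (cv == "AU") <;> cases (cv == "UA") <;>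
    cases pvOkLoop a <;> decide

theorem pv_mem_colors_ne_A (c cv : String) (h : cv ∈ children_colors_from_parent c) :
    (cv == "A") = false := by
  unfold children_colors_from_parent at h
  split_ifs at h <;> simp only [List.mem_cons, List.not_mem_nil, or_false] at h <;>
    first
    | exact h.elim
    | (rcases h with h | h | h | h <;> subst h <;> decide)
    | (rcases h with h | h | h <;> subst h <;> decide)

-- A's recursion computes exactly: filter pvOk over the suffix-style product of the candidates
theorem pv_go_eq_filter_prod (l : List (List String)) (c : String) :
    ∀ (n : Nat) (i : Int), ((l.length : Int) - i).toNat = n →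
      get_assignmentsGo l c n i
        = (pvProd ((PySem.List.pyRange i (l.length : Int) 1).map (pvCand l c))).filter pvOk := by
  intro n
  induction n with
  | zero =>
    intro i h
    have hle : (l.length : Int) ≤ i := by omega
    simp [get_assignmentsGo, PySem.List.pyRange_one_eq_nil hle, pvProd, pvOk, pvOkLoop]
  | succ n ih =>
    intro i h
    have hlt : i < (l.length : Int) := by omega
    rw [PySem.List.pyRange_one_cons hlt, List.map_cons]
    have ih' := ih (i + 1) (by omega)
    simp only [get_assignmentsGo, ih', pvProd, pvCand]
    cases PySem.List.pyGet? l i with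
    | none => simp
    | some v =>
      cases hleaf : is_leaf v
      case true =>
        simp only [hleaf, if_true]
        cases hc : (!(c == "AU") && !(c == "UA"))
        case true =>
          simp only [if_true]
          simp only [List.flatMap_cons, List.flatMap_nil, List.append_nil,
            List.filter_map, List.filter_filter]
          congr 1
          apply List.filter_congr; intro lp _
          simp only [Function.comp_apply, pvOk_A_cons]
          cases pvOk lp <;> cases lp.contains "AU" <;> cases lp.contains "UA" <;> decide
        case false =>
          simp
      case false =>
        simp only [hleaf, Bool.false_eq_true, if_false]
        rw [PySem.List.foldl_append_eq_flatMap, List.nil_append]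
        rw [List.filter_flatMap]
        apply List.flatMap_congr; intro cv hcv
        rw [List.filter_map, List.filter_filter]
        congr 1
        apply List.filter_congr; intro a _
        have := pvOk_color_cons cv (pv_mem_colors_ne_A c cv hcv) a
        simp only [Function.comp_apply, this]

-- ===== VERDICT (by name: the statement is the Claim_ definition above) =====
theorem get_assignments_spec : Claim_equal_get_assignments := by
  intro l c i _ _
  unfold Spec_get_assignments get_assignments
  rw [pv_go_eq_filter_prod l c _ i rfl]
  simp only [get_assignments_alt]
  rw [pv_fold_prod]
  simp
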